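-- pv_equiv track=rewrite | github.com/SahanVkaru/Meta-Python-course | Python 6/BFS.py | get_next_states_puzzle
-- ===== SOURCE A (Python) =====
-- def get_next_states_puzzle(state):
--     """Generate all valid next states of an 8-puzzle."""
--     state = [list(row) for row in state]
--     blank_r = blank_c = 0
--     for i in range(3):
--         for j in range(3):
--             if state[i][j] == 0:
--                 blank_r, blank_c = i, j
--     moves = [(-1,0),(1,0),(0,-1),(0,1)]
--     states = []
--     for dr, dc in moves:
--         nr, nc = blank_r + dr, blank_c + dc
--         if 0 <= nr < 3 and 0 <= nc < 3:
--             new_state = [row[:] for row in state]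
--             new_state[blank_r][blank_c], new_state[nr][nc] = \
--                 new_state[nr][nc], new_state[blank_r][blank_c]
--             states.append(tuple(tuple(r) for r in new_state))
--     return states
-- ===== SOURCE B (Python) =====
-- # Flat-board re-implementation: precomputed adjacency table over flat indices 0..8
-- # (up, down, left, right order) instead of (dr,dc) arithmetic with 2-D bounds checks.
--
-- _ADJ = ([3, 1], [4, 0, 2], [5, 1],
--         [0, 6, 4], [1, 7, 3, 5], [2, 8, 4],
--         [3, 7], [4, 6, 8], [5, 7])
--
-- def get_next_states_puzzle(state):
--     """Generate all valid next states of an 8-puzzle."""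
--     rows = [list(row) for row in state]
--     blank = 0
--     for k in range(9):
--         if rows[k // 3][k % 3] == 0:
--             blank = k
--     states = []
--     for n in _ADJ[blank]:
--         new_rows = [row[:] for row in rows]
--         br, bc, nr, nc = blank // 3, blank % 3, n // 3, n % 3
--         new_rows[br][bc], new_rows[nr][nc] = new_rows[nr][nc], new_rows[br][bc]
--         states.append(tuple(tuple(r) for r in new_rows))
--     return states
-- ===== Notes on version B (the rewrite author's own statement) =====
-- stated objective: alternative
-- what changed: B works on a flat 0..8 index: it scans the 3x3 block by flat index to locate the blank and replaces A's (dr,dc) move arithmetic with 2-D bounds checks by a precomputed adjacency table (neighbors listed in up,down,left,right order), swapping via divmod coordinates.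
import Mathlib
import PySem

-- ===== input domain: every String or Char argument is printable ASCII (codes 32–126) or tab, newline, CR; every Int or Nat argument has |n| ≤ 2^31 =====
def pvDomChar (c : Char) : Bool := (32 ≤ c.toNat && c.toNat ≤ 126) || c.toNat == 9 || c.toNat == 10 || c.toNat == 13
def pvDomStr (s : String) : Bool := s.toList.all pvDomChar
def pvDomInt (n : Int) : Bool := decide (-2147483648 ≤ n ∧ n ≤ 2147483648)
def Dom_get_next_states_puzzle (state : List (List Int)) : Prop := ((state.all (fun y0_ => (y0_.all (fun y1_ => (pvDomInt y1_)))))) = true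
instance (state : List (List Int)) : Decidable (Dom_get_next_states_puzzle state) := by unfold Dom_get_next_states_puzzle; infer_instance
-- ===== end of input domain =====

-- B replaces A's (dr,dc) arithmetic + 2-D bounds checks by a flat-index blank scan and a
-- precomputed adjacency table (idiomatic/alternative; no speed claim).

-- ===== PORT A =====
-- literal transliteration of A: copy rows, scan 3x3 for the (last) blank, then try the
-- four (dr,dc) moves with a bounds check, swapping via read-then-two-assignments.
def get_next_states_puzzle (state : List (List Int)) : List (List (List Int)) :=
  let st := state.map (fun row => row)
  let bc0 : Int × Int :=
    (PySem.List.pyRange 0 3 1).foldl (fun bc i =>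
      (PySem.List.pyRange 0 3 1).foldl (fun bc j =>
        if PySem.List.pyGetD (PySem.List.pyGetD st i []) j 1 = 0 then (i, j) else bc) bc)
      (0, 0)
  let blank_r := bc0.1
  let blank_c := bc0.2
  let moves : List (Int × Int) := [(-1,0),(1,0),(0,-1),(0,1)]
  moves.foldl (fun states m =>
    let nr := blank_r + m.1
    let nc := blank_c + m.2
    if 0 ≤ nr ∧ nr < 3 ∧ 0 ≤ nc ∧ nc < 3 then
      let ns := st.map (fun row => row)
      let v1 := PySem.List.pyGetD (PySem.List.pyGetD ns nr []) nc 0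
      let v2 := PySem.List.pyGetD (PySem.List.pyGetD ns blank_r []) blank_c 0
      let ns := PySem.List.pySetD ns blank_r
                  (PySem.List.pySetD (PySem.List.pyGetD ns blank_r []) blank_c v1)
      let ns := PySem.List.pySetD ns nr
                  (PySem.List.pySetD (PySem.List.pyGetD ns nr []) nc v2)
      states ++ [ns.map (fun r => r)]
    else states) []

-- ===== PORT B =====
-- adjacency table over flat indices 0..8, neighbors listed in up, down, left, right order
def pvADJ : List (List Int) :=
  [[3,1],[4,0,2],[5,1],[0,6,4],[1,7,3,5],[2,8,4],[3,7],[4,6,8],[5,7]]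

def get_next_states_puzzle_alt (state : List (List Int)) : List (List (List Int)) :=
  let rows := state.map (fun row => row)
  let blank : Int :=
    (PySem.List.pyRange 0 9 1).foldl (fun b k =>
      if PySem.List.pyGetD
           (PySem.List.pyGetD rows (PySem.Int.floordiv k 3) [])
           (PySem.Int.mod k 3) 1 = 0 then k else b) 0
  (PySem.List.pyGetD pvADJ blank []).foldl (fun states n =>
    let nw := rows.map (fun row => row)
    let br := PySem.Int.floordiv blank 3
    let bc := PySem.Int.mod blank 3
    let nr := PySem.Int.floordiv n 3
    let nc := PySem.Int.mod n 3
    let v1 := PySem.List.pyGetD (PySem.List.pyGetD nw nr []) nc 0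
    let v2 := PySem.List.pyGetD (PySem.List.pyGetD nw br []) bc 0
    let nw := PySem.List.pySetD nw br
                (PySem.List.pySetD (PySem.List.pyGetD nw br []) bc v1)
    let nw := PySem.List.pySetD nw nr
                (PySem.List.pySetD (PySem.List.pyGetD nw nr []) nc v2)
    states ++ [nw.map (fun r => r)]) []

-- ===== PRECONDITION & SPEC =====
-- Pre_: at least 3 rows and the first three rows have at least 3 entries each —
-- exactly the inputs on which the Python A returns (otherwise state[i][j] raises IndexError).
def Pre_get_next_states_puzzle (state : List (List Int)) : Prop :=
  3 ≤ state.length ∧ ∀ row ∈ state.take 3, 3 ≤ row.length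
instance (state : List (List Int)) : Decidable (Pre_get_next_states_puzzle state) := by
  unfold Pre_get_next_states_puzzle; infer_instance

def pvWitness_get_next_states_puzzle : List (List Int) :=
  [[1, 2, 3], [4, 0, 5], [6, 7, 8]]

def Spec_get_next_states_puzzle (state : List (List Int)) (out : List (List (List Int))) : Prop := out = get_next_states_puzzle_alt state
instance (state : List (List Int)) (out : List (List (List Int))) : Decidable (Spec_get_next_states_puzzle state out) := by unfold Spec_get_next_states_puzzle; infer_instance

-- ===== CLAIM (what is proved, stated in full; the proofs are below) =====
def Claim_equal_get_next_states_puzzle : Prop := ∀ (state : List (List Int)), Dom_get_next_states_puzzle state → Pre_get_next_states_puzzle state → Spec_get_next_states_puzzle state (get_next_states_puzzle state)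

-- ===== LEMMAS AND PROOFS =====
theorem pv_cons3 {α : Type} (l : List α) (h : 3 ≤ l.length) :
    ∃ x y z t, l = x :: y :: z :: t := by
  match l with
  | x :: y :: z :: t => exact ⟨x, y, z, t, rfl⟩
  | [] | [_] | [_, _] => simp at h

-- flat index of the last zero in the 3x3 block (0 if none), mirroring both scans
def pvB (a0 a1 a2 b0 b1 b2 c0 c1 c2 : Int) : Int :=
  if c2 = 0 then 8 else if c1 = 0 then 7 else if c0 = 0 then 6 else
  if b2 = 0 then 5 else if b1 = 0 then 4 else if b0 = 0 then 3 else
  if a2 = 0 then 2 else if a1 = 0 then 1 else if a0 = 0 then 0 else 0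

def pvStateOf (a0 a1 a2 b0 b1 b2 c0 c1 c2 : Int) (t0 t1 t2 : List Int)
    (rest : List (List Int)) : List (List Int) :=
  (a0::a1::a2::t0)::(b0::b1::b2::t1)::(c0::c1::c2::t2)::rest

-- A's moves loop, abstracted over the blank coordinates
def pvMovesA (st : List (List Int)) (blank_r blank_c : Int) : List (List (List Int)) :=
  ([(-1,0),(1,0),(0,-1),(0,1)] : List (Int × Int)).foldl (fun states m =>
    let nr := blank_r + m.1
    let nc := blank_c + m.2
    if 0 ≤ nr ∧ nr < 3 ∧ 0 ≤ nc ∧ nc < 3 then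
      let ns := st.map (fun row => row)
      let v1 := PySem.List.pyGetD (PySem.List.pyGetD ns nr []) nc 0
      let v2 := PySem.List.pyGetD (PySem.List.pyGetD ns blank_r []) blank_c 0
      let ns := PySem.List.pySetD ns blank_r
                  (PySem.List.pySetD (PySem.List.pyGetD ns blank_r []) blank_c v1)
      let ns := PySem.List.pySetD ns nr
                  (PySem.List.pySetD (PySem.List.pyGetD ns nr []) nc v2)
      states ++ [ns.map (fun r => r)]
    else states) []

-- B's table loop, abstracted over the flat blank index
def pvMovesB (rows : List (List Int)) (blank : Int) : List (List (List Int)) :=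
  (PySem.List.pyGetD pvADJ blank []).foldl (fun states n =>
    let nw := rows.map (fun row => row)
    let br := PySem.Int.floordiv blank 3
    let bc := PySem.Int.mod blank 3
    let nr := PySem.Int.floordiv n 3
    let nc := PySem.Int.mod n 3
    let v1 := PySem.List.pyGetD (PySem.List.pyGetD nw nr []) nc 0
    let v2 := PySem.List.pyGetD (PySem.List.pyGetD nw br []) bc 0
    let nw := PySem.List.pySetD nw br
                (PySem.List.pySetD (PySem.List.pyGetD nw br []) bc v1)
    let nw := PySem.List.pySetD nw nr
                (PySem.List.pySetD (PySem.List.pyGetD nw nr []) nc v2)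
    states ++ [nw.map (fun r => r)]) []

theorem pvFD0 : PySem.Int.floordiv 0 3 = 0 := by decide
theorem pvFD1 : PySem.Int.floordiv 1 3 = 0 := by decide
theorem pvFD2 : PySem.Int.floordiv 2 3 = 0 := by decide
theorem pvFD3 : PySem.Int.floordiv 3 3 = 1 := by decide
theorem pvFD4 : PySem.Int.floordiv 4 3 = 1 := by decide
theorem pvFD5 : PySem.Int.floordiv 5 3 = 1 := by decide
theorem pvFD6 : PySem.Int.floordiv 6 3 = 2 := by decide
theorem pvFD7 : PySem.Int.floordiv 7 3 = 2 := by decide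
theorem pvFD8 : PySem.Int.floordiv 8 3 = 2 := by decide
theorem pvMD0 : PySem.Int.mod 0 3 = 0 := by decide
theorem pvMD1 : PySem.Int.mod 1 3 = 1 := by decide
theorem pvMD2 : PySem.Int.mod 2 3 = 2 := by decide
theorem pvMD3 : PySem.Int.mod 3 3 = 0 := by decide
theorem pvMD4 : PySem.Int.mod 4 3 = 1 := by decide
theorem pvMD5 : PySem.Int.mod 5 3 = 2 := by decide
theorem pvMD6 : PySem.Int.mod 6 3 = 0 := by decide
theorem pvMD7 : PySem.Int.mod 7 3 = 1 := by decide
theorem pvMD8 : PySem.Int.mod 8 3 = 2 := by decide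

theorem pvADJ0 : PySem.List.pyGetD pvADJ 0 [] = [3, 1] := by decide
theorem pvADJ1 : PySem.List.pyGetD pvADJ 1 [] = [4, 0, 2] := by decide
theorem pvADJ2 : PySem.List.pyGetD pvADJ 2 [] = [5, 1] := by decide
theorem pvADJ3 : PySem.List.pyGetD pvADJ 3 [] = [0, 6, 4] := by decide
theorem pvADJ4 : PySem.List.pyGetD pvADJ 4 [] = [1, 7, 3, 5] := by decide
theorem pvADJ5 : PySem.List.pyGetD pvADJ 5 [] = [2, 8, 4] := by decide
theorem pvADJ6 : PySem.List.pyGetD pvADJ 6 [] = [3, 7] := by decide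
theorem pvADJ7 : PySem.List.pyGetD pvADJ 7 [] = [4, 6, 8] := by decide
theorem pvADJ8 : PySem.List.pyGetD pvADJ 8 [] = [5, 7] := by decide

theorem pvB_range (a0 a1 a2 b0 b1 b2 c0 c1 c2 : Int) :
    0 ≤ pvB a0 a1 a2 b0 b1 b2 c0 c1 c2 ∧ pvB a0 a1 a2 b0 b1 b2 c0 c1 c2 < 9 := by
  unfold pvB; split_ifs <;> norm_num

set_option maxHeartbeats 1000000 in
theorem pvA_eq (a0 a1 a2 b0 b1 b2 c0 c1 c2 : Int) (t0 t1 t2 : List Int)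
    (rest : List (List Int)) :
    get_next_states_puzzle (pvStateOf a0 a1 a2 b0 b1 b2 c0 c1 c2 t0 t1 t2 rest) =
      pvMovesA (pvStateOf a0 a1 a2 b0 b1 b2 c0 c1 c2 t0 t1 t2 rest)
        (pvB a0 a1 a2 b0 b1 b2 c0 c1 c2 / 3) (pvB a0 a1 a2 b0 b1 b2 c0 c1 c2 % 3) := by
  have hbc :
      ((PySem.List.pyRange 0 3 1).foldl (fun bc i =>
        (PySem.List.pyRange 0 3 1).foldl (fun bc j =>
          if PySem.List.pyGetD
              (PySem.List.pyGetD
                ((pvStateOf a0 a1 a2 b0 b1 b2 c0 c1 c2 t0 t1 t2 rest).map (fun row => row)) i [])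
              j 1 = 0 then (i, j) else bc) bc)
        ((0 : Int), (0 : Int)))
      = (pvB a0 a1 a2 b0 b1 b2 c0 c1 c2 / 3, pvB a0 a1 a2 b0 b1 b2 c0 c1 c2 % 3) := by
    rw [show PySem.List.pyRange 0 3 1 = [0, 1, 2] from by decide]
    simp only [pvStateOf, List.map, List.foldl]
    norm_num [pysem]
    unfold pvB
    split_ifs <;> decide
  unfold get_next_states_puzzle pvMovesA
  simp only [hbc]
  simp only [List.map_id']

set_option maxHeartbeats 1000000 in
theorem pvBalt_eq (a0 a1 a2 b0 b1 b2 c0 c1 c2 : Int) (t0 t1 t2 : List Int)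
    (rest : List (List Int)) :
    get_next_states_puzzle_alt (pvStateOf a0 a1 a2 b0 b1 b2 c0 c1 c2 t0 t1 t2 rest) =
      pvMovesB (pvStateOf a0 a1 a2 b0 b1 b2 c0 c1 c2 t0 t1 t2 rest)
        (pvB a0 a1 a2 b0 b1 b2 c0 c1 c2) := by
  have hb :
      ((PySem.List.pyRange 0 9 1).foldl (fun b k =>
        if PySem.List.pyGetD
            (PySem.List.pyGetD
              ((pvStateOf a0 a1 a2 b0 b1 b2 c0 c1 c2 t0 t1 t2 rest).map (fun row => row))
              (PySem.Int.floordiv k 3) [])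
            (PySem.Int.mod k 3) 1 = 0 then k else b) (0 : Int))
      = pvB a0 a1 a2 b0 b1 b2 c0 c1 c2 := by
    rw [show PySem.List.pyRange 0 9 1 = [0, 1, 2, 3, 4, 5, 6, 7, 8] from by decide]
    simp only [pvStateOf, List.map, List.foldl, pvFD0, pvFD1, pvFD2, pvFD3, pvFD4, pvFD5, pvFD6, pvFD7, pvFD8, pvMD0, pvMD1, pvMD2, pvMD3, pvMD4, pvMD5, pvMD6, pvMD7, pvMD8]
    norm_num [pysem]
    unfold pvB
    split_ifs <;> first | rfl | decide
  unfold get_next_states_puzzle_alt pvMovesB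
  simp only [hb]
  simp only [List.map_id']

set_option maxHeartbeats 2000000 in
theorem pvStep0 (a0 a1 a2 b0 b1 b2 c0 c1 c2 : Int) (t0 t1 t2 : List Int) (rest : List (List Int)) :
    pvMovesA (pvStateOf a0 a1 a2 b0 b1 b2 c0 c1 c2 t0 t1 t2 rest) ((0 : Int) / 3) ((0 : Int) % 3) =
      pvMovesB (pvStateOf a0 a1 a2 b0 b1 b2 c0 c1 c2 t0 t1 t2 rest) 0 := by
  simp only [pvMovesA, pvMovesB, pvStateOf, pvADJ0, List.foldl, pvFD0, pvFD1, pvFD2, pvFD3, pvFD4, pvFD5, pvFD6, pvFD7, pvFD8, pvMD0, pvMD1, pvMD2, pvMD3, pvMD4, pvMD5, pvMD6, pvMD7, pvMD8]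
  norm_num [pysem, PySem.List.pySetD_of_nonneg, List.set, List.getD]

set_option maxHeartbeats 2000000 in
theorem pvStep1 (a0 a1 a2 b0 b1 b2 c0 c1 c2 : Int) (t0 t1 t2 : List Int) (rest : List (List Int)) :
    pvMovesA (pvStateOf a0 a1 a2 b0 b1 b2 c0 c1 c2 t0 t1 t2 rest) ((1 : Int) / 3) ((1 : Int) % 3) =
      pvMovesB (pvStateOf a0 a1 a2 b0 b1 b2 c0 c1 c2 t0 t1 t2 rest) 1 := by
  simp only [pvMovesA, pvMovesB, pvStateOf, pvADJ1, List.foldl, pvFD0, pvFD1, pvFD2, pvFD3, pvFD4, pvFD5, pvFD6, pvFD7, pvFD8, pvMD0, pvMD1, pvMD2, pvMD3, pvMD4, pvMD5, pvMD6, pvMD7, pvMD8]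
  norm_num [pysem, PySem.List.pySetD_of_nonneg, List.set, List.getD]

set_option maxHeartbeats 2000000 in
theorem pvStep2 (a0 a1 a2 b0 b1 b2 c0 c1 c2 : Int) (t0 t1 t2 : List Int) (rest : List (List Int)) :
    pvMovesA (pvStateOf a0 a1 a2 b0 b1 b2 c0 c1 c2 t0 t1 t2 rest) ((2 : Int) / 3) ((2 : Int) % 3) =
      pvMovesB (pvStateOf a0 a1 a2 b0 b1 b2 c0 c1 c2 t0 t1 t2 rest) 2 := by
  simp only [pvMovesA, pvMovesB, pvStateOf, pvADJ2, List.foldl, pvFD0, pvFD1, pvFD2, pvFD3, pvFD4, pvFD5, pvFD6, pvFD7, pvFD8, pvMD0, pvMD1, pvMD2, pvMD3, pvMD4, pvMD5, pvMD6, pvMD7, pvMD8]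
  norm_num [pysem, PySem.List.pySetD_of_nonneg, List.set, List.getD]

set_option maxHeartbeats 2000000 in
theorem pvStep3 (a0 a1 a2 b0 b1 b2 c0 c1 c2 : Int) (t0 t1 t2 : List Int) (rest : List (List Int)) :
    pvMovesA (pvStateOf a0 a1 a2 b0 b1 b2 c0 c1 c2 t0 t1 t2 rest) ((3 : Int) / 3) ((3 : Int) % 3) =
      pvMovesB (pvStateOf a0 a1 a2 b0 b1 b2 c0 c1 c2 t0 t1 t2 rest) 3 := by
  simp only [pvMovesA, pvMovesB, pvStateOf, pvADJ3, List.foldl, pvFD0, pvFD1, pvFD2, pvFD3, pvFD4, pvFD5, pvFD6, pvFD7, pvFD8, pvMD0, pvMD1, pvMD2, pvMD3, pvMD4, pvMD5, pvMD6, pvMD7, pvMD8]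
  norm_num [pysem, PySem.List.pySetD_of_nonneg, List.set, List.getD]

set_option maxHeartbeats 2000000 in
theorem pvStep4 (a0 a1 a2 b0 b1 b2 c0 c1 c2 : Int) (t0 t1 t2 : List Int) (rest : List (List Int)) :
    pvMovesA (pvStateOf a0 a1 a2 b0 b1 b2 c0 c1 c2 t0 t1 t2 rest) ((4 : Int) / 3) ((4 : Int) % 3) =
      pvMovesB (pvStateOf a0 a1 a2 b0 b1 b2 c0 c1 c2 t0 t1 t2 rest) 4 := by
  simp only [pvMovesA, pvMovesB, pvStateOf, pvADJ4, List.foldl, pvFD0, pvFD1, pvFD2, pvFD3, pvFD4, pvFD5, pvFD6, pvFD7, pvFD8, pvMD0, pvMD1, pvMD2, pvMD3, pvMD4, pvMD5, pvMD6, pvMD7, pvMD8]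
  norm_num [pysem, PySem.List.pySetD_of_nonneg, List.set, List.getD]

set_option maxHeartbeats 2000000 in
theorem pvStep5 (a0 a1 a2 b0 b1 b2 c0 c1 c2 : Int) (t0 t1 t2 : List Int) (rest : List (List Int)) :
    pvMovesA (pvStateOf a0 a1 a2 b0 b1 b2 c0 c1 c2 t0 t1 t2 rest) ((5 : Int) / 3) ((5 : Int) % 3) =
      pvMovesB (pvStateOf a0 a1 a2 b0 b1 b2 c0 c1 c2 t0 t1 t2 rest) 5 := by
  simp only [pvMovesA, pvMovesB, pvStateOf, pvADJ5, List.foldl, pvFD0, pvFD1, pvFD2, pvFD3, pvFD4, pvFD5, pvFD6, pvFD7, pvFD8, pvMD0, pvMD1, pvMD2, pvMD3, pvMD4, pvMD5, pvMD6, pvMD7, pvMD8]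
  norm_num [pysem, PySem.List.pySetD_of_nonneg, List.set, List.getD]

set_option maxHeartbeats 2000000 in
theorem pvStep6 (a0 a1 a2 b0 b1 b2 c0 c1 c2 : Int) (t0 t1 t2 : List Int) (rest : List (List Int)) :
    pvMovesA (pvStateOf a0 a1 a2 b0 b1 b2 c0 c1 c2 t0 t1 t2 rest) ((6 : Int) / 3) ((6 : Int) % 3) =
      pvMovesB (pvStateOf a0 a1 a2 b0 b1 b2 c0 c1 c2 t0 t1 t2 rest) 6 := by
  simp only [pvMovesA, pvMovesB, pvStateOf, pvADJ6, List.foldl, pvFD0, pvFD1, pvFD2, pvFD3, pvFD4, pvFD5, pvFD6, pvFD7, pvFD8, pvMD0, pvMD1, pvMD2, pvMD3, pvMD4, pvMD5, pvMD6, pvMD7, pvMD8]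
  norm_num [pysem, PySem.List.pySetD_of_nonneg, List.set, List.getD]

set_option maxHeartbeats 2000000 in
theorem pvStep7 (a0 a1 a2 b0 b1 b2 c0 c1 c2 : Int) (t0 t1 t2 : List Int) (rest : List (List Int)) :
    pvMovesA (pvStateOf a0 a1 a2 b0 b1 b2 c0 c1 c2 t0 t1 t2 rest) ((7 : Int) / 3) ((7 : Int) % 3) =
      pvMovesB (pvStateOf a0 a1 a2 b0 b1 b2 c0 c1 c2 t0 t1 t2 rest) 7 := by
  simp only [pvMovesA, pvMovesB, pvStateOf, pvADJ7, List.foldl, pvFD0, pvFD1, pvFD2, pvFD3, pvFD4, pvFD5, pvFD6, pvFD7, pvFD8, pvMD0, pvMD1, pvMD2, pvMD3, pvMD4, pvMD5, pvMD6, pvMD7, pvMD8]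
  norm_num [pysem, PySem.List.pySetD_of_nonneg, List.set, List.getD]

set_option maxHeartbeats 2000000 in
theorem pvStep8 (a0 a1 a2 b0 b1 b2 c0 c1 c2 : Int) (t0 t1 t2 : List Int) (rest : List (List Int)) :
    pvMovesA (pvStateOf a0 a1 a2 b0 b1 b2 c0 c1 c2 t0 t1 t2 rest) ((8 : Int) / 3) ((8 : Int) % 3) =
      pvMovesB (pvStateOf a0 a1 a2 b0 b1 b2 c0 c1 c2 t0 t1 t2 rest) 8 := by
  simp only [pvMovesA, pvMovesB, pvStateOf, pvADJ8, List.foldl, pvFD0, pvFD1, pvFD2, pvFD3, pvFD4, pvFD5, pvFD6, pvFD7, pvFD8, pvMD0, pvMD1, pvMD2, pvMD3, pvMD4, pvMD5, pvMD6, pvMD7, pvMD8]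
  norm_num [pysem, PySem.List.pySetD_of_nonneg, List.set, List.getD]

theorem pvStep (k : Int) (hk0 : 0 ≤ k) (hk : k < 9)
    (a0 a1 a2 b0 b1 b2 c0 c1 c2 : Int) (t0 t1 t2 : List Int) (rest : List (List Int)) :
    pvMovesA (pvStateOf a0 a1 a2 b0 b1 b2 c0 c1 c2 t0 t1 t2 rest) (k / 3) (k % 3) =
      pvMovesB (pvStateOf a0 a1 a2 b0 b1 b2 c0 c1 c2 t0 t1 t2 rest) k := by
  interval_cases k
  · exact pvStep0 a0 a1 a2 b0 b1 b2 c0 c1 c2 t0 t1 t2 rest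
  · exact pvStep1 a0 a1 a2 b0 b1 b2 c0 c1 c2 t0 t1 t2 rest
  · exact pvStep2 a0 a1 a2 b0 b1 b2 c0 c1 c2 t0 t1 t2 rest
  · exact pvStep3 a0 a1 a2 b0 b1 b2 c0 c1 c2 t0 t1 t2 rest
  · exact pvStep4 a0 a1 a2 b0 b1 b2 c0 c1 c2 t0 t1 t2 rest
  · exact pvStep5 a0 a1 a2 b0 b1 b2 c0 c1 c2 t0 t1 t2 rest
  · exact pvStep6 a0 a1 a2 b0 b1 b2 c0 c1 c2 t0 t1 t2 rest
  · exact pvStep7 a0 a1 a2 b0 b1 b2 c0 c1 c2 t0 t1 t2 rest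
  · exact pvStep8 a0 a1 a2 b0 b1 b2 c0 c1 c2 t0 t1 t2 rest

-- ===== VERDICT (by name: the statement is the Claim_ definition above) =====
set_option maxHeartbeats 1000000 in
theorem get_next_states_puzzle_spec : Claim_equal_get_next_states_puzzle := by
  intro state _ hpre
  obtain ⟨hlen, hrow⟩ := hpre
  obtain ⟨r0, r1, r2, rest, rfl⟩ := pv_cons3 state hlen
  obtain ⟨a0, a1, a2, t0, rfl⟩ := pv_cons3 r0 (hrow _ (by simp))
  obtain ⟨b0, b1, b2, t1, rfl⟩ := pv_cons3 r1 (hrow _ (by simp))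
  obtain ⟨c0, c1, c2, t2, rfl⟩ := pv_cons3 r2 (hrow _ (by simp))
  show get_next_states_puzzle (pvStateOf a0 a1 a2 b0 b1 b2 c0 c1 c2 t0 t1 t2 rest) =
    get_next_states_puzzle_alt (pvStateOf a0 a1 a2 b0 b1 b2 c0 c1 c2 t0 t1 t2 rest)
  rw [pvA_eq, pvBalt_eq,
      pvStep _ (pvB_range a0 a1 a2 b0 b1 b2 c0 c1 c2).1 (pvB_range a0 a1 a2 b0 b1 b2 c0 c1 c2).2]
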